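-- pv_equiv track=rewrite | github.com/gtvkun/AGMaquinas | AG.py | penalidade
-- ===== SOURCE A (Python) =====
-- NUM_MAQUINAS = 7
--
-- CAPACIDADES = [20, 15, 35, 40, 15, 15, 10]
--
-- INTERVALOS_MANUTENCAO = [2, 2, 1, 1, 1, 1, 1]
--
-- DEMANDAS = [80, 90, 65, 70]
--
-- NUM_INTERVALOS = 4
--
-- def calcular_reserva(cromossomo):
--     # Calcula Reserva de Potência disponível em cada intervalo
--     reservas = []
--     for intervalo in range(NUM_INTERVALOS):
--         demanda = DEMANDAS[intervalo]
--         potencia_disponivel = sum(CAPACIDADES)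
--         for i in range(NUM_MAQUINAS):
--             for k in range(INTERVALOS_MANUTENCAO[i]):
--                 if cromossomo[i] + k == intervalo:
--                     potencia_disponivel -= CAPACIDADES[i]
--         reserva = potencia_disponivel - demanda
--         reservas.append(reserva)
--     return reservas
--
-- def penalidade(cromossomo):
-- # Calcula penalidades caso não haja potência suficiente ou manutenção inválida
--     reserva = calcular_reserva(cromossomo)
--     penalidade_total = 0
--     for r in reserva:
--         if r < 0:
--             penalidade_total += abs(r) * 10        # Penalidade proporcional ao déficit
--     for i in [0, 1]:
--         if INTERVALOS_MANUTENCAO[i] == 2: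
--             if cromossomo[i] > NUM_INTERVALOS - 2:
--                 penalidade_total += 1000           # Penalidade se manutenção extrapola o intervalo
--     return penalidade_total
-- ===== SOURCE B (Python) =====
-- NUM_MAQUINAS = 7
-- CAPACIDADES = [20, 15, 35, 40, 15, 15, 10]
-- INTERVALOS_MANUTENCAO = [2, 2, 1, 1, 1, 1, 1]
-- DEMANDAS = [80, 90, 65, 70]
-- NUM_INTERVALOS = 4
--
-- def penalidade(cromossomo):
--     # single machine-centric scatter pass instead of a per-interval rescan
--     used = [0] * NUM_INTERVALOS
--     for i in range(NUM_MAQUINAS):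
--         for k in range(INTERVALOS_MANUTENCAO[i]):
--             t = cromossomo[i] + k
--             if 0 <= t < NUM_INTERVALOS:
--                 used[t] += CAPACIDADES[i]
--     total = sum(CAPACIDADES)
--     pen = 0
--     for t in range(NUM_INTERVALOS):
--         r = total - used[t] - DEMANDAS[t]
--         if r < 0:
--             pen -= r * 10
--     for i in (0, 1):
--         if cromossomo[i] > NUM_INTERVALOS - 2:
--             pen += 1000
--     return pen
-- ===== Notes on version B (the rewrite author's own statement) =====
-- stated objective: alternative
-- what changed: calcular_reserva's per-interval rescan of every machine's maintenance slots (gather) is replaced by a single machine-centric scatter pass that accumulates a 4-slot usage table with bounds-guarded writes, from which each interval's reserve and penalty are computed in one pass.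
import Mathlib
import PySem

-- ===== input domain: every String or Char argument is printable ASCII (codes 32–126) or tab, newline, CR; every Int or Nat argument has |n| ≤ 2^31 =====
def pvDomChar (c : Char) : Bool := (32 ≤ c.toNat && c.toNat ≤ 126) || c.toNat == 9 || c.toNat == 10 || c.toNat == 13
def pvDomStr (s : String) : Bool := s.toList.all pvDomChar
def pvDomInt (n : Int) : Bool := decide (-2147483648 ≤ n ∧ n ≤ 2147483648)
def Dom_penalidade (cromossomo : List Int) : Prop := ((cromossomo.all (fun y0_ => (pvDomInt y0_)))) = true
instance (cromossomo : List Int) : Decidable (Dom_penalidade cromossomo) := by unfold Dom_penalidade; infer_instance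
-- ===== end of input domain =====

-- B replaces A's per-interval rescan of all machines by one machine-centric
-- scatter pass over a 4-slot usage table (objective: alternative traversal).

-- module constants shared by both ports
def pvCAP : List Int := [20, 15, 35, 40, 15, 15, 10]
def pvMANUT : List Int := [2, 2, 1, 1, 1, 1, 1]
def pvDEM : List Int := [80, 90, 65, 70]

-- ===== PORT A =====
-- cromossomo[i] is in range for i < 7 whenever Pre_ holds, so pyGetD's default is never used
def calcular_reserva (cromossomo : List Int) : List Int :=
  (PySem.List.pyRange 0 4 1).foldl (fun reservas intervalo =>
    let demanda := PySem.List.pyGetD pvDEM intervalo 0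
    let potencia :=
      (PySem.List.pyRange 0 7 1).foldl (fun p i =>
        (PySem.List.pyRange 0 (PySem.List.pyGetD pvMANUT i 0) 1).foldl (fun p k =>
          if PySem.List.pyGetD cromossomo i 0 + k = intervalo then
            p - PySem.List.pyGetD pvCAP i 0
          else p) p) pvCAP.sum
    reservas ++ [potencia - demanda]) []

def penalidade (cromossomo : List Int) : Int :=
  let reserva := calcular_reserva cromossomo
  let pt := reserva.foldl (fun acc r => if r < 0 then acc + |r| * 10 else acc) 0
  ([0, 1] : List Int).foldl (fun acc i =>
    if PySem.List.pyGetD pvMANUT i 0 = 2 then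
      if PySem.List.pyGetD cromossomo i 0 > 4 - 2 then acc + 1000 else acc
    else acc) pt

-- ===== PORT B =====
-- used[t] += cap, guarded by 0 <= t < NUM_INTERVALOS
def pvBump (u : List Int) (t : Int) (cap : Int) : List Int :=
  if 0 ≤ t ∧ t < 4 then u.set t.toNat (u.getD t.toNat 0 + cap) else u

def penalidade_alt (cromossomo : List Int) : Int :=
  let used :=
    (PySem.List.pyRange 0 7 1).foldl (fun u i =>
      (PySem.List.pyRange 0 (PySem.List.pyGetD pvMANUT i 0) 1).foldl (fun u k =>
        pvBump u (PySem.List.pyGetD cromossomo i 0 + k) (PySem.List.pyGetD pvCAP i 0)) u)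
      [0, 0, 0, 0]
  let total := pvCAP.sum
  let pen :=
    (PySem.List.pyRange 0 4 1).foldl (fun p t =>
      let r := total - PySem.List.pyGetD used t 0 - PySem.List.pyGetD pvDEM t 0
      if r < 0 then p - r * 10 else p) 0
  ([0, 1] : List Int).foldl (fun p i =>
    if PySem.List.pyGetD cromossomo i 0 > 4 - 2 then p + 1000 else p) pen

-- ===== PRECONDITION & SPEC =====
-- Pre_: the Python A raises IndexError when len(cromossomo) < 7 (it reads cromossomo[0..6])
def Pre_penalidade (cromossomo : List Int) : Prop := 7 ≤ cromossomo.length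
instance (cromossomo : List Int) : Decidable (Pre_penalidade cromossomo) := by unfold Pre_penalidade; infer_instance
def pvWitness_penalidade : List Int := [0, 2, 1, 3, 0, 1, 2]

def Spec_penalidade (cromossomo : List Int) (out : Int) : Prop := out = penalidade_alt cromossomo
instance (cromossomo : List Int) (out : Int) : Decidable (Spec_penalidade cromossomo out) := by unfold Spec_penalidade; infer_instance

-- ===== CLAIM (what is proved, stated in full; the proofs are below) =====
def Claim_equal_penalidade : Prop := ∀ (cromossomo : List Int), Dom_penalidade cromossomo → Pre_penalidade cromossomo → Spec_penalidade cromossomo (penalidade cromossomo)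

-- ===== LEMMAS AND PROOFS =====

-- linearize A's conditional-subtract accumulator step
theorem ite_sub_step (c : Prop) [Decidable c] (p a : Int) :
    (if c then p - a else p) = p - (if c then a else 0) := by
  split_ifs <;> simp

-- linearize A's penalty accumulator step (|r| = -r when r < 0)
theorem ite_abs_step (acc r : Int) :
    (if r < 0 then acc + |r| * 10 else acc) = acc - (if r < 0 then r * 10 else 0) := by
  split_ifs with h
  · rw [abs_of_neg h]; ring
  · simp

-- linearize the long-maintenance overrun step
theorem ite_1000_step (c : Prop) [Decidable c] (p : Int) :
    (if c then p + 1000 else p) = p + (if c then 1000 else 0) := by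
  split_ifs <;> simp

theorem pvBump_length (u : List Int) (t cap : Int) : (pvBump u t cap).length = u.length := by
  unfold pvBump; split_ifs <;> simp

-- reading slot j of the usage table after one guarded scatter write
theorem pvBump_getD (u : List Int) (hlen : u.length = 4) (t cap j : Int)
    (h0 : 0 ≤ j) (hj : j < 4) :
    PySem.List.pyGetD (pvBump u t cap) j 0
      = PySem.List.pyGetD u j 0 + (if t = j then cap else 0) := by
  rcases u with _ | ⟨a1, _ | ⟨b1, _ | ⟨c1, _ | ⟨d1, _ | ⟨e1, u⟩⟩⟩⟩⟩ <;> simp_all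
  by_cases hb : 0 ≤ t ∧ t < 4
  · rw [pvBump, if_pos hb]
    obtain ⟨hb1, hb2⟩ := hb
    interval_cases t <;> interval_cases j <;>
      norm_num [PySem.List.pyGetD_ofNat', List.getElem_set,
        (show Int.toNat 2 = 2 from rfl), (show Int.toNat 3 = 3 from rfl)]
  · have ht : t ≠ j := by omega
    rw [pvBump, if_neg hb]
    simp [ht]

theorem pvBump_getD0 (u : List Int) (hlen : u.length = 4) (t cap : Int) :
    PySem.List.pyGetD (pvBump u t cap) 0 0
      = PySem.List.pyGetD u 0 0 + (if t = 0 then cap else 0) :=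
  pvBump_getD u hlen t cap 0 (by norm_num) (by norm_num)

theorem pvBump_getD1 (u : List Int) (hlen : u.length = 4) (t cap : Int) :
    PySem.List.pyGetD (pvBump u t cap) 1 0
      = PySem.List.pyGetD u 1 0 + (if t = 1 then cap else 0) :=
  pvBump_getD u hlen t cap 1 (by norm_num) (by norm_num)

theorem pvBump_getD2 (u : List Int) (hlen : u.length = 4) (t cap : Int) :
    PySem.List.pyGetD (pvBump u t cap) 2 0
      = PySem.List.pyGetD u 2 0 + (if t = 2 then cap else 0) :=
  pvBump_getD u hlen t cap 2 (by norm_num) (by norm_num)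

theorem pvBump_getD3 (u : List Int) (hlen : u.length = 4) (t cap : Int) :
    PySem.List.pyGetD (pvBump u t cap) 3 0
      = PySem.List.pyGetD u 3 0 + (if t = 3 then cap else 0) :=
  pvBump_getD u hlen t cap 3 (by norm_num) (by norm_num)

theorem penalidade_main (c0 c1 c2 c3 c4 c5 c6 : Int) (rest : List Int) :
    penalidade (c0 :: c1 :: c2 :: c3 :: c4 :: c5 :: c6 :: rest)
      = penalidade_alt (c0 :: c1 :: c2 :: c3 :: c4 :: c5 :: c6 :: rest) := by
  have hR1 : PySem.List.pyRange 0 1 1 = [0] := rfl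
  have hR2 : PySem.List.pyRange 0 2 1 = [0, 1] := rfl
  have hR4 : PySem.List.pyRange 0 4 1 = [0, 1, 2, 3] := rfl
  have hR7 : PySem.List.pyRange 0 7 1 = [0, 1, 2, 3, 4, 5, 6] := rfl
  have h0 : PySem.List.pyGetD (c0 :: c1 :: c2 :: c3 :: c4 :: c5 :: c6 :: rest) 0 0 = c0 := by
    rw [PySem.List.pyGetD_ofNat']; rfl
  have h1 : PySem.List.pyGetD (c0 :: c1 :: c2 :: c3 :: c4 :: c5 :: c6 :: rest) 1 0 = c1 := by
    rw [PySem.List.pyGetD_ofNat']; rfl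
  have h2 : PySem.List.pyGetD (c0 :: c1 :: c2 :: c3 :: c4 :: c5 :: c6 :: rest) 2 0 = c2 := by
    rw [PySem.List.pyGetD_ofNat']; rfl
  have h3 : PySem.List.pyGetD (c0 :: c1 :: c2 :: c3 :: c4 :: c5 :: c6 :: rest) 3 0 = c3 := by
    rw [PySem.List.pyGetD_ofNat']; rfl
  have h4 : PySem.List.pyGetD (c0 :: c1 :: c2 :: c3 :: c4 :: c5 :: c6 :: rest) 4 0 = c4 := by
    rw [PySem.List.pyGetD_ofNat']; rfl
  have h5 : PySem.List.pyGetD (c0 :: c1 :: c2 :: c3 :: c4 :: c5 :: c6 :: rest) 5 0 = c5 := by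
    rw [PySem.List.pyGetD_ofNat']; rfl
  have h6 : PySem.List.pyGetD (c0 :: c1 :: c2 :: c3 :: c4 :: c5 :: c6 :: rest) 6 0 = c6 := by
    rw [PySem.List.pyGetD_ofNat']; rfl
  have hM0 : PySem.List.pyGetD pvMANUT 0 0 = 2 := rfl
  have hM1 : PySem.List.pyGetD pvMANUT 1 0 = 2 := rfl
  have hM2 : PySem.List.pyGetD pvMANUT 2 0 = 1 := rfl
  have hM3 : PySem.List.pyGetD pvMANUT 3 0 = 1 := rfl
  have hM4 : PySem.List.pyGetD pvMANUT 4 0 = 1 := rfl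
  have hM5 : PySem.List.pyGetD pvMANUT 5 0 = 1 := rfl
  have hM6 : PySem.List.pyGetD pvMANUT 6 0 = 1 := rfl
  have hC0 : PySem.List.pyGetD pvCAP 0 0 = 20 := rfl
  have hC1 : PySem.List.pyGetD pvCAP 1 0 = 15 := rfl
  have hC2 : PySem.List.pyGetD pvCAP 2 0 = 35 := rfl
  have hC3 : PySem.List.pyGetD pvCAP 3 0 = 40 := rfl
  have hC4 : PySem.List.pyGetD pvCAP 4 0 = 15 := rfl
  have hC5 : PySem.List.pyGetD pvCAP 5 0 = 15 := rfl
  have hC6 : PySem.List.pyGetD pvCAP 6 0 = 10 := rfl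
  have hD0 : PySem.List.pyGetD pvDEM 0 0 = 80 := rfl
  have hD1 : PySem.List.pyGetD pvDEM 1 0 = 90 := rfl
  have hD2 : PySem.List.pyGetD pvDEM 2 0 = 65 := rfl
  have hD3 : PySem.List.pyGetD pvDEM 3 0 = 70 := rfl
  have hS : pvCAP.sum = 150 := rfl
  have hB0 : PySem.List.pyGetD ([0, 0, 0, 0] : List Int) 0 0 = 0 := rfl
  have hB1 : PySem.List.pyGetD ([0, 0, 0, 0] : List Int) 1 0 = 0 := rfl
  have hB2 : PySem.List.pyGetD ([0, 0, 0, 0] : List Int) 2 0 = 0 := rfl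
  have hB3 : PySem.List.pyGetD ([0, 0, 0, 0] : List Int) 3 0 = 0 := rfl
  have hL4 : ([0, 0, 0, 0] : List Int).length = 4 := rfl
  simp only [penalidade, penalidade_alt, calcular_reserva,
    hR1, hR2, hR4, hR7, h0, h1, h2, h3, h4, h5, h6,
    hM0, hM1, hM2, hM3, hM4, hM5, hM6, hC0, hC1, hC2, hC3, hC4, hC5, hC6,
    hD0, hD1, hD2, hD3, hS, hB0, hB1, hB2, hB3, hL4,
    List.foldl_cons, List.foldl_nil, List.nil_append, List.cons_append,
    ite_sub_step, ite_abs_step, ite_1000_step,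
    pvBump_getD0, pvBump_getD1, pvBump_getD2, pvBump_getD3, pvBump_length,
    add_zero, zero_add, sub_sub, if_true]


-- ===== VERDICT (by name: the statement is the Claim_ definition above) =====
theorem penalidade_spec : Claim_equal_penalidade := by
  intro c _ hpre
  unfold Spec_penalidade
  match c, hpre with
  | c0 :: c1 :: c2 :: c3 :: c4 :: c5 :: c6 :: rest, _ =>
    exact penalidade_main c0 c1 c2 c3 c4 c5 c6 rest
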